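-- pv_equiv track=rewrite | github.com/ronnieg/python_hackerrank | 4_Sets/task_02.py | diff
-- ===== SOURCE A (Python) =====
-- def diff(m, n):
--     l = []
--     m = set(m)
--     n = set(n)
--     m1 = list(m.difference(n))
--     n1 = list(n.difference(m))
--     for i in m1:
--         l.append(i)
--     for j in n1:
--         l.append(j)
--     l.sort()
--     return l
-- ===== SOURCE B (Python) =====
-- def diff(m, n):
--     cnt = {}
--     for x in dict.fromkeys(m):
--         cnt[x] = cnt.get(x, 0) + 1
--     for x in dict.fromkeys(n):
--         cnt[x] = cnt.get(x, 0) + 1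
--     return sorted(k for k, c in cnt.items() if c == 1)
-- ===== Notes on version B (the rewrite author's own statement) =====
-- stated objective: alternative
-- what changed: Replaces the two directed set-differences concatenated and sorted by a single membership-count table (how many of the two deduplicated inputs contain each element) filtered to the keys with count exactly 1, then sorted.
import Mathlib
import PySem

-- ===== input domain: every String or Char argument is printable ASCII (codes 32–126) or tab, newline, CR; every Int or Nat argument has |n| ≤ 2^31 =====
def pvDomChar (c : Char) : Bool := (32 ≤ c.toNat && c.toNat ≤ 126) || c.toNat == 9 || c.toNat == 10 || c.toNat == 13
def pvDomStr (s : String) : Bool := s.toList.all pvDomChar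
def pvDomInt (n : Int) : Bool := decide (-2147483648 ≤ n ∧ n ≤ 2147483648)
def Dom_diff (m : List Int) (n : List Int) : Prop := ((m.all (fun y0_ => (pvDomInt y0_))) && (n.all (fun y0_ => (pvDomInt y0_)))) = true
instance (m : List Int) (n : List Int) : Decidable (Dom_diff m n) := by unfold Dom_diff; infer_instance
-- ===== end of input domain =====

-- B replaces A's two directed set-differences + concatenation with a membership-count table
-- filtered by count == 1 (alternative decomposition, same cost).

-- ===== PORT A =====
def diff (m : List Int) (n : List Int) : List Int :=
  let l : List Int := []
  let ms : PySem.Set Int := PySem.Set.ofList m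
  let ns : PySem.Set Int := PySem.Set.ofList n
  let m1 : List Int := PySem.Set.diff ms ns
  let n1 : List Int := PySem.Set.diff ns ms
  let l := m1.foldl (fun acc i => acc ++ [i]) l
  let l := n1.foldl (fun acc j => acc ++ [j]) l
  PySem.List.sorted l (fun x => x) false

-- ===== PORT B =====
def diff_alt (m : List Int) (n : List Int) : List Int :=
  let cnt : PySem.Dict Int Int := PySem.Dict.empty
  let cnt := (PySem.List.dedup m).foldl (fun d x => d.insert x (d.getD x 0 + 1)) cnt
  let cnt := (PySem.List.dedup n).foldl (fun d x => d.insert x (d.getD x 0 + 1)) cnt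
  PySem.List.sorted ((cnt.items.filter (fun kc => kc.2 == 1)).map (·.1)) (fun x => x) false

-- ===== PRECONDITION & SPEC =====
def Spec_diff (m : List Int) (n : List Int) (out : List Int) : Prop := out = diff_alt m n
instance (m : List Int) (n : List Int) (out : List Int) : Decidable (Spec_diff m n out) := by unfold Spec_diff; infer_instance

-- ===== CLAIM (what is proved, stated in full; the proofs are below) =====
def Claim_equal_diff : Prop := ∀ (m : List Int) (n : List Int), Dom_diff m n → Spec_diff m n (diff m n)

-- ===== LEMMAS AND PROOFS =====

theorem foldl_append_id {α : Type} (l init : List α) :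
    l.foldl (fun acc x => acc ++ [x]) init = init ++ l := by
  induction l generalizing init with
  | nil => simp
  | cons a t ih => simp [List.foldl_cons, ih, List.append_assoc]

-- the counting loop of B is Counter over the concatenated deduplicated inputs
theorem cnt_eq_counter (m n : List Int) :
    (PySem.List.dedup n).foldl (fun d x => d.insert x (d.getD x 0 + 1))
      ((PySem.List.dedup m).foldl (fun d x => d.insert x (d.getD x 0 + 1)) PySem.Dict.empty)
    = PySem.Dict.counter (PySem.List.dedup m ++ PySem.List.dedup n) := by
  rw [← PySem.Dict.foldl_insert_getD_add_one_eq_counter, List.foldl_append]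

theorem count_ofList (x : Int) (l : List Int) :
    (PySem.Set.ofList l).count x = if x ∈ l then 1 else 0 := by
  split_ifs with h
  · exact List.count_eq_one_of_mem (PySem.Set.nodup_ofList l) ((PySem.Set.mem_ofList l x).2 h)
  · exact List.count_eq_zero_of_not_mem (fun hc => h ((PySem.Set.mem_ofList l x).1 hc))

theorem diff_spec_aux (m n : List Int) : diff m n = diff_alt m n := by
  unfold diff diff_alt
  dsimp only
  rw [cnt_eq_counter]
  simp only [PySem.Dict.items_counter, foldl_append_id, List.nil_append,
    List.filter_map, List.map_map, Function.comp_def, List.map_id']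
  apply (PySem.List.sorted_id_eq_sorted_id_iff_perm _ _).2
  apply (List.perm_ext_iff_of_nodup _ _).2
  · intro x
    simp only [List.mem_append, PySem.Set.mem_diff, PySem.Set.mem_ofList, List.mem_filter,
      List.count_append, beq_iff_eq]
    by_cases hm : x ∈ m <;> by_cases hn : x ∈ n <;> simp [hm, hn, count_ofList]
  · refine List.Nodup.append
      (PySem.Set.nodup_diff _ _ (PySem.Set.nodup_ofList m))
      (PySem.Set.nodup_diff _ _ (PySem.Set.nodup_ofList n)) ?_
    intro x hx hx'
    have h1 := (PySem.Set.mem_diff _ _ x).1 hx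
    have h2 := (PySem.Set.mem_diff _ _ x).1 hx'
    tauto
  · exact (PySem.Set.nodup_ofList _).filter _

-- ===== VERDICT (by name: the statement is the Claim_ definition above) =====
theorem diff_spec : Claim_equal_diff := by
  intro m n _
  unfold Spec_diff
  exact diff_spec_aux m n
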